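-- pv_equiv track=rewrite | github.com/elpusk/public.lpu23x | code/python/PatternAnalysis/bin_operation.py | bin_get_2d_found_pattern
-- ===== SOURCE A (Python) =====
-- def bin_find_pattern_in_1d_array(array_bin, pattern):
--     pattern_length = len(pattern)
--     array_length = len(array_bin)
--     result = []
--     #
--     if(pattern_length > array_length):
--         return result
--     if(pattern_length == 0):
--         return result
--     if(array_length == 0):
--         return result
--     #
--     for i in range(array_length - pattern_length + 1):
--         if array_bin[i:i + pattern_length] == pattern:
--             result.append(i)
--     #
--     return result
--
-- def bin_find_pattern_in_2d_array(array_2d_bin, pattern):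
--     found = []
--     if len(array_2d_bin)==0:
--         return found
--     for ar in array_2d_bin:
--         pos = bin_find_pattern_in_1d_array(ar,pattern)
--         found.append(pos)
--     #
--     return found
--
-- def bin_is_empty_2d_binary_array(ar_2d):
--     if len(ar_2d) == 0:
--         return True
--
--     b_empty = True
--     for ar_1d in ar_2d:
--         if len(ar_1d) != 0:
--             b_empty = False
--             break
--         #
--     # end for
--     return b_empty
--
-- def bin_get_2d_found_pattern(array_2d_bin, pattern):
--     found_2d_bin = []
--     found_index = bin_find_pattern_in_2d_array(array_2d_bin,pattern)
--     if bin_is_empty_2d_binary_array(found_index):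
--         return found_2d_bin
--     #
--     for i in range(len(found_index)):
--         if len(found_index[i]) > 0:
--             ar_1d = array_2d_bin[i]
--             #
--             for index in found_index[i]:
--                  ar_found = ar_1d[index:]
--                  found_2d_bin.append(ar_found)
--     #
--     return found_2d_bin
-- ===== SOURCE B (Python) =====
-- def _suffixes(row):
--     # all suffixes of row, longest first (row itself down to [])
--     out = []
--     while True:
--         out.append(row)
--         if not row:
--             return out
--         row = row[1:]
--
-- def bin_get_2d_found_pattern(array_2d_bin, pattern):
--     if not pattern:
--         return []
--     m = len(pattern)
--     found = []
--     for row in array_2d_bin: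
--         found += [s for s in _suffixes(row) if s[:m] == pattern]
--     return found
-- ===== Notes on version B (the rewrite author's own statement) =====
-- stated objective: simpler
-- what changed: Replaces A's three-phase pipeline (per-row index lists via a sliding window, a 2D emptiness scan, then re-indexing rows and slicing each match) with a single pass that filters each row's suffix list by whether the pattern is its prefix.
import Mathlib
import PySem

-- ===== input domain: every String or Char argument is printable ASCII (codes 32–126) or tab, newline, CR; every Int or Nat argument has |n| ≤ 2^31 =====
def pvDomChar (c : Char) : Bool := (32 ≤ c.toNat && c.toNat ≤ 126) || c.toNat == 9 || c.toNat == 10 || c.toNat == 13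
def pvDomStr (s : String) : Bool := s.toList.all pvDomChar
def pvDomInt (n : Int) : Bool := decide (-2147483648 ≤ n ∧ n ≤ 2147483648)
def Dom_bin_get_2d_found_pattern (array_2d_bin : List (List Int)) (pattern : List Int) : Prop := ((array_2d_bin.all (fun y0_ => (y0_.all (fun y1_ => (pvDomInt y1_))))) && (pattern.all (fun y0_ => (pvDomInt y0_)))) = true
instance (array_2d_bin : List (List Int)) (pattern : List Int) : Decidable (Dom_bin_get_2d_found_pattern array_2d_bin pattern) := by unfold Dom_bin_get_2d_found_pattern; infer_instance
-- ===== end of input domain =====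

-- B replaces A's three-phase pipeline (per-row index lists, 2D-emptiness scan, re-index and slice)
-- with a single pass filtering each row's suffixes by whether the pattern is their prefix (simpler).


-- ===== PORT A =====
def bin_find_pattern_in_1d_array (array_bin : List Int) (pattern : List Int) : List Int :=
  let pattern_length : Int := pattern.length
  let array_length : Int := array_bin.length
  if pattern_length > array_length then []
  else if pattern_length = 0 then []
  else if array_length = 0 then []
  else
    (PySem.List.pyRange 0 (array_length - pattern_length + 1) 1).foldl
      (fun result i =>
        if PySem.List.slice array_bin (some i) (some (i + pattern_length)) = pattern then
          result ++ [i]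
        else result) []

def bin_find_pattern_in_2d_array (array_2d_bin : List (List Int)) (pattern : List Int) : List (List Int) :=
  if array_2d_bin.length = 0 then []
  else array_2d_bin.foldl (fun found ar => found ++ [bin_find_pattern_in_1d_array ar pattern]) []

-- the 'for … break' loop of bin_is_empty_2d_binary_array
def pvIsEmptyLoop : List (List Int) → Bool
  | [] => true
  | ar_1d :: rest => if ar_1d.length ≠ 0 then false else pvIsEmptyLoop rest

def bin_is_empty_2d_binary_array (ar_2d : List (List Int)) : Bool :=
  if ar_2d.length = 0 then true else pvIsEmptyLoop ar_2d

def bin_get_2d_found_pattern (array_2d_bin : List (List Int)) (pattern : List Int) : List (List Int) :=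
  let found_index := bin_find_pattern_in_2d_array array_2d_bin pattern
  if bin_is_empty_2d_binary_array found_index then []
  else
    (PySem.List.pyRange 0 (found_index.length : Int) 1).foldl
      (fun found_2d_bin i =>
        let fi := PySem.List.pyGetD found_index i []
        if fi.length > 0 then
          let ar_1d := PySem.List.pyGetD array_2d_bin i []
          fi.foldl (fun acc index => acc ++ [PySem.List.slice ar_1d (some index) none]) found_2d_bin
        else found_2d_bin) []

-- ===== PORT B =====
-- all suffixes of row, longest first (row itself down to [])
def pvSuffixes : List Int → List (List Int)
  | [] => [[]]
  | x :: xs => (x :: xs) :: pvSuffixes xs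

def bin_get_2d_found_pattern_alt (array_2d_bin : List (List Int)) (pattern : List Int) : List (List Int) :=
  if pattern = [] then []
  else
    array_2d_bin.foldl
      (fun found row =>
        found ++ (pvSuffixes row).filter
          (fun s => PySem.List.slice s none (some (pattern.length : Int)) = pattern)) []

-- ===== PRECONDITION & SPEC =====
def Spec_bin_get_2d_found_pattern (array_2d_bin : List (List Int)) (pattern : List Int) (out : List (List Int)) : Prop := out = bin_get_2d_found_pattern_alt array_2d_bin pattern
instance (array_2d_bin : List (List Int)) (pattern : List Int) (out : List (List Int)) : Decidable (Spec_bin_get_2d_found_pattern array_2d_bin pattern out) := by unfold Spec_bin_get_2d_found_pattern; infer_instance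

-- ===== CLAIM (what is proved, stated in full; the proofs are below) =====
def Claim_equal_bin_get_2d_found_pattern : Prop := ∀ (array_2d_bin : List (List Int)) (pattern : List Int), Dom_bin_get_2d_found_pattern array_2d_bin pattern → Spec_bin_get_2d_found_pattern array_2d_bin pattern (bin_get_2d_found_pattern array_2d_bin pattern)

-- ===== LEMMAS AND PROOFS =====

-- the per-row value both programs compute: the row's suffix at each matching position
def pvRowOut (row : List Int) (pattern : List Int) : List (List Int) :=
  (bin_find_pattern_in_1d_array row pattern).map
    (fun idx => PySem.List.slice row (some idx) none)

theorem pvSuffixes_eq (row : List Int) :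
    pvSuffixes row = (List.range (row.length + 1)).map (row.drop ·) := by
  induction row with
  | nil => simp [pvSuffixes]
  | cons x xs ih =>
      simp [pvSuffixes, ih, List.range_succ_eq_map, List.map_map, Function.comp_def]

-- per-row equality: A's matches-then-slice equals B's suffix filter (pattern nonempty)
theorem row_eq (row pattern : List Int) (hp : pattern ≠ []) :
    pvRowOut row pattern
      = (pvSuffixes row).filter
          (fun s => PySem.List.slice s none (some (pattern.length : Int)) = pattern) := by
  have hm : 1 ≤ pattern.length := List.length_pos_of_ne_nil hp
  -- B side normal form
  have hB : (pvSuffixes row).filter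
        (fun s => PySem.List.slice s none (some (pattern.length : Int)) = pattern)
      = ((List.range (row.length + 1)).filter
          (fun k => decide ((row.drop k).take pattern.length = pattern))).map (row.drop ·) := by
    rw [pvSuffixes_eq, List.filter_map]
    congr 1
    apply List.filter_congr
    intro k _
    simp [PySem.List.slice_to_natCast]
  rw [hB]
  by_cases hmn : row.length < pattern.length
  · -- pattern longer than the row: both sides empty
    have hA : bin_find_pattern_in_1d_array row pattern = [] := by
      unfold bin_find_pattern_in_1d_array
      rw [if_pos (by exact_mod_cast hmn)]
    rw [pvRowOut, hA, List.map_nil]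
    symm
    rw [List.map_eq_nil_iff, List.filter_eq_nil_iff]
    intro k _
    simp only [decide_eq_true_eq]
    intro hc
    have := congrArg List.length hc
    simp [List.length_take, List.length_drop] at this
    omega
  · rw [not_lt] at hmn
    have hn : 1 ≤ row.length := le_trans hm hmn
    -- A side normal form
    have hA : bin_find_pattern_in_1d_array row pattern
        = (List.map (fun k : Nat => (k : Int)) (List.range (row.length - pattern.length + 1))).filter
            (fun i => decide (PySem.List.slice row (some i) (some (i + (pattern.length : Int))) = pattern)) := by
      unfold bin_find_pattern_in_1d_array
      rw [if_neg (by exact_mod_cast not_lt.mpr hmn), if_neg (by omega), if_neg (by omega)]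
      have hcast : ((row.length : Int) - pattern.length + 1)
          = ((row.length - pattern.length + 1 : Nat) : Int) := by push_cast [hmn]; ring
      rw [hcast, PySem.List.pyRange_zero_nat,
        PySem.List.foldl_append_ite_eq_filter
          (p := fun i => PySem.List.slice row (some i) (some (i + (pattern.length : Int))) = pattern),
        List.nil_append]
    rw [pvRowOut, hA, List.filter_map, List.map_map]
    have hpred : ∀ k ∈ List.range (row.length - pattern.length + 1),
        ((fun i => decide (PySem.List.slice row (some i) (some (i + (pattern.length : Int))) = pattern)) ∘ (fun k : Nat => (k : Int))) k
          = decide ((row.drop k).take pattern.length = pattern) := by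
      intro k _
      simp [PySem.List.slice_natCast_add]
    rw [List.filter_congr hpred]
    have hcomp : ((fun idx => PySem.List.slice row (some idx) none) ∘ (fun k : Nat => (k : Int)))
        = (row.drop ·) := by
      funext k
      simp [PySem.List.slice_from_natCast]
    rw [hcomp]
    -- extend A's scan range by the positions where a match is impossible
    have hre : List.range (row.length + 1)
        = List.range (row.length - pattern.length + 1)
          ++ (List.range pattern.length).map (fun x => row.length - pattern.length + 1 + x) := by
      rw [show row.length + 1 = (row.length - pattern.length + 1) + pattern.length by omega]
      exact List.range_add
    rw [hre, List.filter_append]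
    have hnil : ((List.range pattern.length).map (fun x => row.length - pattern.length + 1 + x)).filter
        (fun k => decide ((row.drop k).take pattern.length = pattern)) = [] := by
      rw [List.filter_eq_nil_iff]
      intro k hk
      obtain ⟨j, hj, rfl⟩ := List.mem_map.mp hk
      rw [List.mem_range] at hj
      simp only [decide_eq_true_eq]
      intro hc
      have := congrArg List.length hc
      simp [List.length_take, List.length_drop] at this
      omega
    rw [hnil, List.append_nil]

theorem pvIsEmptyLoop_eq_true {l : List (List Int)} (h : pvIsEmptyLoop l = true) :
    ∀ x ∈ l, x = [] := by
  induction l with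
  | nil => simp
  | cons y ys ih =>
      simp only [pvIsEmptyLoop] at h
      by_cases hy : y.length ≠ 0
      · simp [hy] at h
      · simp only [List.mem_cons]
        rintro x (rfl | hx)
        · simpa using hy
        · exact ih (by simpa [hy] using h) x hx

theorem pvIsEmptyLoop_map_nil (a : List (List Int)) :
    pvIsEmptyLoop (a.map (fun _ => ([] : List Int))) = true := by
  induction a with
  | nil => rfl
  | cons y ys ih => simpa [pvIsEmptyLoop] using ih

theorem found_index_eq (a : List (List Int)) (pattern : List Int) :
    bin_find_pattern_in_2d_array a pattern
      = a.map (fun row => bin_find_pattern_in_1d_array row pattern) := by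
  unfold bin_find_pattern_in_2d_array
  rcases a with _ | ⟨r, rs⟩
  · simp
  · rw [if_neg (by simp)]
    simpa using PySem.List.foldl_append_singleton_eq_map
      (l := r :: rs) (f := fun row => bin_find_pattern_in_1d_array row pattern) (acc := [])

-- the main loop of A equals the flatMap of per-row outputs
theorem main_loop_eq (a : List (List Int)) (pattern : List Int) :
    (PySem.List.pyRange 0 (((a.map (fun row => bin_find_pattern_in_1d_array row pattern)).length : Int)) 1).foldl
      (fun found_2d_bin i =>
        let fi := PySem.List.pyGetD (a.map (fun row => bin_find_pattern_in_1d_array row pattern)) i []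
        if fi.length > 0 then
          let ar_1d := PySem.List.pyGetD a i []
          fi.foldl (fun acc index => acc ++ [PySem.List.slice ar_1d (some index) none]) found_2d_bin
        else found_2d_bin) []
      = a.flatMap (fun row => pvRowOut row pattern) := by
  set f := fun row => bin_find_pattern_in_1d_array row pattern with hf
  have hbody : (fun (found_2d_bin : List (List Int)) (i : Int) =>
        let fi := PySem.List.pyGetD (a.map f) i []
        if fi.length > 0 then
          let ar_1d := PySem.List.pyGetD a i []
          fi.foldl (fun acc index => acc ++ [PySem.List.slice ar_1d (some index) none]) found_2d_bin
        else found_2d_bin)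
      = (fun acc i => acc ++ (PySem.List.pyGetD (a.map f) i []).map
          (fun idx => PySem.List.slice (PySem.List.pyGetD a i []) (some idx) none)) := by
    funext acc i
    simp only []
    by_cases h : (PySem.List.pyGetD (a.map f) i []).length > 0
    · rw [if_pos h, PySem.List.foldl_append_singleton_eq_map]
    · rw [if_neg h]
      have : PySem.List.pyGetD (a.map f) i [] = [] := by
        simpa using Nat.eq_zero_of_not_pos h
      rw [this]; simp
  rw [hbody, PySem.List.foldl_append_eq_flatMap, List.nil_append, List.flatMap_def,
    List.flatMap_def]
  congr 1
  have hmap : (PySem.List.pyRange 0 ((a.map f).length : Int) 1).map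
      (fun i => (PySem.List.pyGetD (a.map f) i []).map
          (fun idx => PySem.List.slice (PySem.List.pyGetD a i []) (some idx) none))
      = (PySem.List.pyRange 0 ((a.map f).length : Int) 1).map
          (fun i => pvRowOut (PySem.List.pyGetD a i []) pattern) := by
    apply List.map_congr_left
    intro i hi
    rw [PySem.List.mem_pyRange_one] at hi
    have h0 : (0:Int) ≤ i := hi.1
    have h1 : i < ((a.map f).length : Int) := hi.2
    rw [PySem.List.pyGetD_eq_getElem (a.map f) [] h0 (by simpa using h1),
        PySem.List.pyGetD_eq_getElem a [] h0 (by simpa using h1)]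
    simp [pvRowOut, hf]
  rw [hmap]
  have hcomp : (PySem.List.pyRange 0 ((a.map f).length : Int) 1).map
      (fun i => pvRowOut (PySem.List.pyGetD a i []) pattern)
      = ((PySem.List.pyRange 0 ((a.map f).length : Int) 1).map
          (fun j => PySem.List.pyGetD a j [])).map (fun row => pvRowOut row pattern) := by
    rw [List.map_map]; simp [Function.comp_def]
  rw [hcomp]
  have hlen2 : ((a.map f).length : Int) = (a.length : Int) := by simp
  rw [hlen2, PySem.List.map_pyGetD_pyRange_zero']

-- find1d with empty pattern is []
theorem find1d_nil (row : List Int) : bin_find_pattern_in_1d_array row [] = [] := by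
  unfold bin_find_pattern_in_1d_array
  simp

theorem A_eq_flatMap (a : List (List Int)) (pattern : List Int) :
    bin_get_2d_found_pattern a pattern = a.flatMap (fun row => pvRowOut row pattern) := by
  unfold bin_get_2d_found_pattern
  rw [found_index_eq]
  by_cases he : bin_is_empty_2d_binary_array
      (a.map (fun row => bin_find_pattern_in_1d_array row pattern)) = true
  · rw [if_pos he]
    unfold bin_is_empty_2d_binary_array at he
    rcases a with _ | ⟨r, rs⟩
    · simp
    · rw [if_neg (by simp)] at he
      symm
      rw [List.flatMap_eq_nil_iff]
      intro row hrow
      have : bin_find_pattern_in_1d_array row pattern = [] :=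
        pvIsEmptyLoop_eq_true he _ (List.mem_map_of_mem hrow)
      simp [pvRowOut, this]
  · rw [if_neg he]
    exact main_loop_eq a pattern

theorem A_empty_pattern (a : List (List Int)) :
    bin_get_2d_found_pattern a [] = [] := by
  unfold bin_get_2d_found_pattern
  rw [found_index_eq]
  rw [if_pos]
  unfold bin_is_empty_2d_binary_array
  rcases a with _ | ⟨r, rs⟩
  · simp
  · rw [if_neg (by simp)]
    simpa [find1d_nil] using pvIsEmptyLoop_map_nil (r :: rs)

-- ===== VERDICT (by name: the statement is the Claim_ definition above) =====
theorem bin_get_2d_found_pattern_spec : Claim_equal_bin_get_2d_found_pattern := by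
  intro a pattern _
  unfold Spec_bin_get_2d_found_pattern bin_get_2d_found_pattern_alt
  by_cases hp : pattern = []
  · simp [hp, A_empty_pattern]
  · rw [if_neg hp, A_eq_flatMap a pattern]
    rw [PySem.List.foldl_append_eq_flatMap]
    simp only [List.nil_append]
    exact List.flatMap_congr (fun row _ => row_eq row pattern hp)
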